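-- pv_equiv track=rewrite | github.com/Nadhil-an/ThreatLens-Social-Media-Threat-Monitoring | threatlens/analysis/threat_detector.py | analyze_keywords
-- ===== SOURCE A (Python) =====
-- def analyze_keywords(keywords):
--
--     score = 0
--     indicators = []
--
--     keyword_scores = {
--         "free giveaway": 2,
--         "verify account": 2,
--         "urgent": 1,
--         "crypto investment": 3,
--         "click here": 2,
--     }
--
--     for keyword in keywords:
--         text = keyword.lower()
--
--         for rule in keyword_scores:
--
--             if rule in text:
--                 score += keyword_scores[rule]
--                 indicators.append(rule)
--
--     return score, indicators
-- ===== SOURCE B (Python) =====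
-- def analyze_keywords(keywords):
--     rules = [
--         ("free giveaway", 2),
--         ("verify account", 2),
--         ("urgent", 1),
--         ("crypto investment", 3),
--         ("click here", 2),
--     ]
--     weights = dict(rules)
--     indicators = []
--     for keyword in keywords:
--         text = keyword.lower()
--         hits = set()
--         # naive multi-pattern scan: walk the text positions once, recording
--         # every rule that starts at each position
--         for i in range(len(text) + 1):
--             for rule, _ in rules:
--                 if text.startswith(rule, i):
--                     hits.add(rule)
--         indicators.extend(r for r, _ in rules if r in hits)
--     score = sum(weights[r] for r in indicators)
--     return score, indicators
-- ===== Notes on version B (the rewrite author's own statement) =====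
-- stated objective: alternative
-- what changed: Replaces A's per-rule substring tests ('rule in text') with a naive multi-pattern scan that walks each text's positions once, collecting into a set every rule that starts at each position, then emits matched rules per keyword and computes the score as a separate final reduction over the collected indicators.
import Mathlib
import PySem

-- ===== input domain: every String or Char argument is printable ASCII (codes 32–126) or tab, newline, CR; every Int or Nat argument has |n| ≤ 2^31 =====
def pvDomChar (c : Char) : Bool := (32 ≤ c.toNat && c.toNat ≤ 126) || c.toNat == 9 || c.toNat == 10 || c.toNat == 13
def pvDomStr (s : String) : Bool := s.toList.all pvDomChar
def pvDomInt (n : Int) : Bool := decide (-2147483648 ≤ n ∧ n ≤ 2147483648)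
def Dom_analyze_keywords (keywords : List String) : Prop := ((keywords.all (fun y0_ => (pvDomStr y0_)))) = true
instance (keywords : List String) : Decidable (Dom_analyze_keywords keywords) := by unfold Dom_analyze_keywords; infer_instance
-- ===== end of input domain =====

-- B replaces A's per-rule substring tests with a naive multi-pattern scan over the
-- text's positions (recording every rule that starts at each position into a set),
-- then emits matched rules per keyword and sums their weights in a separate final
-- reduction; objective: alternative (same value, different matching algorithm).

-- ===== PORT A =====
-- the literal dict from A's source (insertion order)
def pvScores : PySem.Dict String Int :=
  PySem.Dict.ofList [("free giveaway", 2), ("verify account", 2), ("urgent", 1),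
                     ("crypto investment", 3), ("click here", 2)]

-- fused loop: one fold over keywords, inner fold over the dict's keys, one (score, indicators) state
def analyze_keywords (keywords : List String) : Int × List String :=
  keywords.foldl
    (fun acc keyword =>
      let text := PySem.Str.lower keyword
      pvScores.keys.foldl
        (fun acc rule =>
          if PySem.Str.isIn rule text then (acc.1 + pvScores.getD rule 0, acc.2 ++ [rule])
          else acc)
        acc)
    (0, [])

-- ===== PORT B =====
-- the literal (rule, weight) list from Source B
def pvRules : List (String × Int) :=
  [("free giveaway", 2), ("verify account", 2), ("urgent", 1),
   ("crypto investment", 3), ("click here", 2)]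

-- weights = dict(rules)
def pvWeights : PySem.Dict String Int := PySem.Dict.ofList pvRules

-- Source B's inner position scan for one lowered text: for i in range(len(text)+1),
-- add to `hits` every rule with text.startswith(rule, i).
-- (text.startswith(rule, i) is ported as Chars.startswith on (t.drop i.toNat),
-- exact for the 0 ≤ i ≤ len(text) produced by range.)
def pvHits (t : List Char) : PySem.Set String :=
  (PySem.List.pyRange 0 ((t.length : Int) + 1)).foldl
    (fun h i =>
      pvRules.foldl
        (fun h rw =>
          if PySem.Chars.startswith (t.drop i.toNat) rw.1.toList then PySem.Set.add h rw.1
          else h)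
        h)
    PySem.Set.empty

def analyze_keywords_alt (keywords : List String) : Int × List String :=
  let indicators :=
    keywords.foldl
      (fun acc keyword =>
        let t := (PySem.Str.lower keyword).toList
        let hits := pvHits t
        acc ++ (pvRules.filter (fun rw => PySem.Set.contains hits rw.1)).map (fun rw => rw.1))
      []
  let score := (indicators.map (fun r => pvWeights.getD r 0)).sum
  (score, indicators)

-- ===== PRECONDITION & SPEC =====
def Spec_analyze_keywords (keywords : List String) (out : Int × List String) : Prop := out = analyze_keywords_alt keywords
instance (keywords : List String) (out : Int × List String) : Decidable (Spec_analyze_keywords keywords out) := by unfold Spec_analyze_keywords; infer_instance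

-- ===== CLAIM (what is proved, stated in full; the proofs are below) =====
def Claim_equal_analyze_keywords : Prop := ∀ (keywords : List String), Dom_analyze_keywords keywords → Spec_analyze_keywords keywords (analyze_keywords keywords)

-- ===== LEMMAS AND PROOFS =====

-- membership in B's inner fold over the rules at one position
theorem pv_mem_rule_fold (x : String) (rs : List (String × Int)) (p : String → Bool)
    (h : PySem.Set String) :
    (x ∈ rs.foldl (fun h rw => if p rw.1 then PySem.Set.add h rw.1 else h) h) ↔
      x ∈ h ∨ ∃ rw ∈ rs, x = rw.1 ∧ p rw.1 = true := by
  induction rs generalizing h with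
  | nil => simp
  | cons r rs ih =>
    rw [List.foldl_cons]
    by_cases hp : p r.1 = true
    · simp only [hp, if_true, ih, PySem.Set.mem_add]
      constructor
      · rintro (((hx | rfl)) | ⟨rw, hrw, rfl, hpw⟩)
        · exact Or.inl hx
        · exact Or.inr ⟨r, List.mem_cons_self, rfl, hp⟩
        · exact Or.inr ⟨rw, List.mem_cons_of_mem _ hrw, rfl, hpw⟩
      · rintro (hx | ⟨rw, hrw, rfl, hpw⟩)
        · exact Or.inl (Or.inl hx)
        · rcases List.mem_cons.mp hrw with rfl | hrw
          · exact Or.inl (Or.inr rfl)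
          · exact Or.inr ⟨rw, hrw, rfl, hpw⟩
    · simp only [Bool.not_eq_true] at hp
      simp only [hp, Bool.false_eq_true, if_false, ih]
      constructor
      · rintro (hx | ⟨rw, hrw, rfl, hpw⟩)
        · exact Or.inl hx
        · exact Or.inr ⟨rw, List.mem_cons_of_mem _ hrw, rfl, hpw⟩
      · rintro (hx | ⟨rw, hrw, rfl, hpw⟩)
        · exact Or.inl hx
        · rcases List.mem_cons.mp hrw with rfl | hrw
          · rw [hp] at hpw; cases hpw
          · exact Or.inr ⟨rw, hrw, rfl, hpw⟩

-- membership in B's position fold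
theorem pv_mem_pos_fold (x : String) (t : List Char) (is : List Int) (h : PySem.Set String) :
    (x ∈ is.foldl
        (fun h i =>
          pvRules.foldl
            (fun h rw =>
              if PySem.Chars.startswith (t.drop i.toNat) rw.1.toList then PySem.Set.add h rw.1
              else h)
            h)
        h) ↔
      x ∈ h ∨ ∃ i ∈ is, ∃ rw ∈ pvRules, x = rw.1 ∧
        PySem.Chars.startswith (t.drop i.toNat) rw.1.toList = true := by
  induction is generalizing h with
  | nil => simp
  | cons i is ih =>
    rw [List.foldl_cons, ih]
    have hin := pv_mem_rule_fold x pvRules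
      (fun r => PySem.Chars.startswith (t.drop i.toNat) r.toList) h
    constructor
    · rintro (hmem | ⟨j, hj, rw, hrw, rfl, hs⟩)
      · rcases hin.mp hmem with hx | ⟨rw, hrw, rfl, hs⟩
        · exact Or.inl hx
        · exact Or.inr ⟨i, List.mem_cons_self, rw, hrw, rfl, hs⟩
      · exact Or.inr ⟨j, List.mem_cons_of_mem _ hj, rw, hrw, rfl, hs⟩
    · rintro (hx | ⟨j, hj, rw, hrw, rfl, hs⟩)
      · exact Or.inl (hin.mpr (Or.inl hx))
      · rcases List.mem_cons.mp hj with rfl | hj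
        · exact Or.inl (hin.mpr (Or.inr ⟨rw, hrw, rfl, hs⟩))
        · exact Or.inr ⟨j, hj, rw, hrw, rfl, hs⟩

-- the position scan finds a rule iff it is a substring ('rule in text')
theorem pv_scan_iff_isIn (sub t : List Char) :
    (∃ i ∈ PySem.List.pyRange 0 ((t.length : Int) + 1),
        PySem.Chars.startswith (t.drop i.toNat) sub = true) ↔
      PySem.Chars.isIn sub t = true := by
  rw [← PySem.Chars.exists_prefix_drop_iff_isIn]
  constructor
  · rintro ⟨i, _, hs⟩
    exact ⟨i.toNat, (PySem.Chars.startswith_iff _ _).mp hs⟩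
  · rintro ⟨j, hj⟩
    by_cases hle : j ≤ t.length
    · refine ⟨(j : Int), ?_, ?_⟩
      · rw [PySem.List.mem_pyRange_one]; omega
      · rw [Int.toNat_natCast, PySem.Chars.startswith_iff]; exact hj
    · have hnil : t.drop j = [] := List.drop_eq_nil_of_le (by omega)
      rw [hnil, List.prefix_nil] at hj
      refine ⟨0, ?_, ?_⟩
      · rw [PySem.List.mem_pyRange_one]; omega
      · rw [PySem.Chars.startswith_iff, hj]; exact List.nil_prefix
  
-- hits membership, for a rule name, is exactly the substring test A performs
theorem pv_contains_hits (t : List Char) (rw : String × Int) (hrw : rw ∈ pvRules) :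
    PySem.Set.contains (pvHits t) rw.1 = PySem.Chars.isIn rw.1.toList t := by
  have hmem : rw.1 ∈ pvHits t ↔ PySem.Chars.isIn rw.1.toList t = true := by
    unfold pvHits
    rw [pv_mem_pos_fold]
    constructor
    · rintro (hx | ⟨i, hi, rw', hrw', heq, hs⟩)
      · cases hx
      · rw [heq]
        exact (pv_scan_iff_isIn rw'.1.toList t).mp ⟨i, hi, hs⟩
    · intro hin
      rcases (pv_scan_iff_isIn rw.1.toList t).mpr hin with ⟨i, hi, hs⟩
      exact Or.inr ⟨i, hi, rw, hrw, rfl, hs⟩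
  unfold PySem.Set.contains
  by_cases h : PySem.Chars.isIn rw.1.toList t = true
  · rw [h]; exact List.contains_iff_mem.mpr (hmem.mpr h)
  · simp only [Bool.not_eq_true] at h
    rw [h]
    rw [Bool.eq_false_iff]
    intro hc
    exact absurd (hmem.mp (List.contains_iff_mem.mp hc)) (by rw [h]; simp)

-- filtering the rule pairs then projecting = filtering the keys, for agreeing predicates
theorem pv_filter_keys (q : String → Bool) (p : String × Int → Bool)
    (hpq : ∀ rw ∈ pvRules, p rw = q rw.1) :
    (pvRules.filter p).map (fun rw => rw.1) = pvScores.keys.filter q := by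
  have hkeys : pvScores.keys = pvRules.map (fun rw => rw.1) := by decide
  rw [hkeys, List.filter_map]
  congr 1
  exact List.filter_congr hpq

-- B's per-keyword emitted list is A's filter of the rule keys by 'rule in text'
theorem pv_keyword_list (keyword : String) :
    (pvRules.filter
        (fun rw => PySem.Set.contains (pvHits (PySem.Str.lower keyword).toList) rw.1)).map
        (fun rw => rw.1)
      = pvScores.keys.filter (fun rule => PySem.Str.isIn rule (PySem.Str.lower keyword)) := by
  apply pv_filter_keys
  intro rw hrw
  rw [pv_contains_hits _ rw hrw]
  simp [PySem.Str.isIn]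

-- A's inner loop over the rule keys, characterised as filter + sum
theorem pv_inner (rules : List String) (t : String) (s : Int) (ind : List String) :
    rules.foldl
      (fun acc rule =>
        if PySem.Str.isIn rule t then (acc.1 + pvScores.getD rule 0, acc.2 ++ [rule])
        else acc)
      (s, ind)
    = (s + (((rules.filter (fun rule => PySem.Str.isIn rule t)).map
               (fun r => pvScores.getD r 0)).sum),
       ind ++ rules.filter (fun rule => PySem.Str.isIn rule t)) := by
  induction rules generalizing s ind with
  | nil => simp
  | cons r rs ih =>
    rw [List.foldl_cons, List.filter_cons]
    by_cases h : PySem.Str.isIn r t = true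
    · simp only [h, if_true, ih, List.map_cons, List.sum_cons]
      refine Prod.ext ?_ ?_ <;> simp [add_assoc]
    · simp only [Bool.not_eq_true] at h
      simp only [h, Bool.false_eq_true, if_false, ih]

-- A's outer loop, characterised against the flatMap/sum shape
theorem pv_outer (keywords : List String) (s : Int) (ind : List String) :
    keywords.foldl
      (fun acc keyword =>
        let text := PySem.Str.lower keyword
        pvScores.keys.foldl
          (fun acc rule =>
            if PySem.Str.isIn rule text then (acc.1 + pvScores.getD rule 0, acc.2 ++ [rule])
            else acc)
          acc)
      (s, ind)
    = (s + (((keywords.flatMap (fun keyword =>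
              pvScores.keys.filter (fun rule => PySem.Str.isIn rule (PySem.Str.lower keyword)))).map
              (fun r => pvScores.getD r 0)).sum),
       ind ++ keywords.flatMap (fun keyword =>
              pvScores.keys.filter (fun rule => PySem.Str.isIn rule (PySem.Str.lower keyword)))) := by
  induction keywords generalizing s ind with
  | nil => simp
  | cons k ks ih =>
    simp only [List.foldl_cons, List.flatMap_cons]
    rw [pv_inner, ih]
    simp [List.map_append, add_assoc]

-- ===== VERDICT (by name: the statement is the Claim_ definition above) =====
theorem analyze_keywords_spec : Claim_equal_analyze_keywords := by
  intro keywords _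
  show _ = _
  unfold analyze_keywords analyze_keywords_alt
  simp only []
  rw [pv_outer]
  have hind :
      keywords.foldl
        (fun acc keyword =>
          acc ++ (pvRules.filter
            (fun rw => PySem.Set.contains (pvHits (PySem.Str.lower keyword).toList) rw.1)).map
            (fun rw => rw.1))
        []
      = keywords.flatMap (fun keyword =>
          pvScores.keys.filter (fun rule => PySem.Str.isIn rule (PySem.Str.lower keyword))) := by
    rw [PySem.List.foldl_append_eq_flatMap]
    simp only [List.nil_append]
    exact List.flatMap_congr (fun k _ => pv_keyword_list k)
  have hw : pvWeights = pvScores := by decide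
  rw [hind, hw]
  simp
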